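-- pv_equiv track=rewrite | github.com/Zhiwei-Z/JSTrading | strategies/pennying.py | highest_buy
-- ===== SOURCE A (Python) =====
-- def highest_buy(book):
--     bids = book['buy']
--     h = 0
--     s = 0
--     for price, size in bids:
--         h = max(h, price)
--         s = size
--     return h, s
-- ===== SOURCE B (Python) =====
-- def _hb(bids):
--     # bids is nonempty: recurse to the last pair, which supplies the size
--     # and the 0-floor for the max; combine maxima on the way back up.
--     price, size = bids[0]
--     rest = bids[1:]
--     if not rest:
--         return (max(price, 0), size)
--     h, s = _hb(rest)
--     return (max(price, h), s)
--
-- def highest_buy(book):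
--     bids = book['buy']
--     if not bids:
--         return (0, 0)
--     return _hb(bids)
-- ===== Notes on version B (the rewrite author's own statement) =====
-- stated objective: alternative
-- what changed: Replaces A's iterative fused loop (running max + trailing size accumulators) with a structural recursion whose base case is the last bid, where the size is read and the 0-floor applied, combining maxima on the way back up; no mutable accumulators.
import Mathlib
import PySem

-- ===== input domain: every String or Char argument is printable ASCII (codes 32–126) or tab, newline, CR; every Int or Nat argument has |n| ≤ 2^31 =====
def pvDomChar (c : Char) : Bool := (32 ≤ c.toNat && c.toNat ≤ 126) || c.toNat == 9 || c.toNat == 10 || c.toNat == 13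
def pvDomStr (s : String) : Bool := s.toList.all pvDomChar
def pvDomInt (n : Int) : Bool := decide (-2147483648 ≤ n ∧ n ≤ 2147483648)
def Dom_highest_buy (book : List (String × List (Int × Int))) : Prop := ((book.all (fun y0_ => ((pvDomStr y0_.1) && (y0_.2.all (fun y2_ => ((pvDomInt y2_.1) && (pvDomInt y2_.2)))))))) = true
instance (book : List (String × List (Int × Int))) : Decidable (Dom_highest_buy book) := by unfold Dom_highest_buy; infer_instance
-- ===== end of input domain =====

-- B replaces A's iterative fused loop with a structural recursion whose base case is
-- the last bid (objective: alternative). Pre_ excludes books without a 'buy' key,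
-- on which A raises KeyError.

-- ===== PORT A =====
def highest_buy (book : List (String × List (Int × Int))) : Int × Int :=
  let bids := ((book.find? (fun p => p.1 == "buy")).getD ("", [])).2
  bids.foldl (fun hs ps => (max hs.1 ps.1, ps.2)) (0, 0)

-- ===== PORT B =====
def hbRec : List (Int × Int) → Int × Int
  | [] => (0, 0)          -- unreachable: caller guards against empty
  | [ps] => (max ps.1 0, ps.2)
  | ps :: rest => let r := hbRec rest; (max ps.1 r.1, r.2)

def highest_buy_alt (book : List (String × List (Int × Int))) : Int × Int :=
  let bids := ((book.find? (fun p => p.1 == "buy")).getD ("", [])).2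
  if bids = [] then (0, 0) else hbRec bids

-- ===== PRECONDITION & SPEC =====
-- Pre_ excludes books without a 'buy' key, on which Python's book['buy'] raises KeyError.
def Pre_highest_buy (book : List (String × List (Int × Int))) : Prop :=
  "buy" ∈ book.map Prod.fst
instance (book : List (String × List (Int × Int))) : Decidable (Pre_highest_buy book) := by
  unfold Pre_highest_buy; infer_instance
def pvWitness_highest_buy : (List (String × List (Int × Int))) := [("buy", [(3, 7), (2, 5)])]
def Spec_highest_buy (book : List (String × List (Int × Int))) (out : Int × Int) : Prop := out = highest_buy_alt book
instance (book : List (String × List (Int × Int))) (out : Int × Int) : Decidable (Spec_highest_buy book out) := by unfold Spec_highest_buy; infer_instance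

-- ===== CLAIM =====
def Claim_equal_highest_buy : Prop := ∀ (book : List (String × List (Int × Int))), Dom_highest_buy book → Pre_highest_buy book → Spec_highest_buy book (highest_buy book)

-- ===== LEMMAS AND PROOFS =====

lemma foldl_max_comm (t : List Int) (a b : Int) :
    t.foldl max (max a b) = max a (t.foldl max b) := by
  induction t generalizing b with
  | nil => rfl
  | cons x xs ih => simp only [List.foldl_cons, max_assoc, ih]

-- A's fused loop computes the running max of the prices and the last size (default s0).
lemma foldA_char (bids : List (Int × Int)) (h0 s0 : Int) :
    bids.foldl (fun hs ps => (max hs.1 ps.1, ps.2)) (h0, s0)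
      = ((bids.map Prod.fst).foldl max h0, (bids.getLast?.map Prod.snd).getD s0) := by
  induction bids generalizing h0 s0 with
  | nil => rfl
  | cons p rest ih =>
      simp only [List.foldl_cons, List.map_cons, ih]
      cases rest with
      | nil => rfl
      | cons q t =>
          simp only [List.getLast?_cons_cons]
          cases h : (q :: t).getLast? with
          | none => simp at h
          | some r => simp

-- B's recursion computes the same pair on nonempty lists.
lemma hbRec_char (bids : List (Int × Int)) (hne : bids ≠ []) :
    hbRec bids = ((bids.map Prod.fst).foldl max 0, (bids.getLast?.map Prod.snd).getD 0) := by
  induction bids with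
  | nil => exact absurd rfl hne
  | cons p rest ih =>
      cases rest with
      | nil => simp [hbRec, max_comm]
      | cons q t =>
          simp only [hbRec, ih (List.cons_ne_nil q t), List.map_cons, List.foldl_cons,
            List.getLast?_cons_cons]
          rw [foldl_max_comm, foldl_max_comm, max_left_comm, max_assoc]

-- ===== VERDICT =====
theorem highest_buy_spec : Claim_equal_highest_buy := by
  intro book _ _
  simp only [Spec_highest_buy, highest_buy, highest_buy_alt]
  generalize ((book.find? (fun p => p.1 == "buy")).getD ("", [])).2 = bids
  rw [foldA_char]
  by_cases h : bids = []
  · subst h; rfl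
  · rw [if_neg h, hbRec_char bids h]
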